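-- pv_equiv track=rewrite | github.com/lvxiafei/MY_PY | 台阶问题-递归-模拟递归.py | fib10
-- ===== SOURCE A (Python) =====
-- def fib10(n):
--     stack = [1,2]
--     if n  <= 2 : return n
--     temp = n - 2
--     while(temp):
--         stack.append(sum(stack)+1)
--         temp -= 1
--     return stack[-1]
-- ===== SOURCE B (Python) =====
-- def fib10(n):
--     # closed form: for n >= 3 the last term of A's recurrence is 2**(n-1)
--     if n <= 2:
--         return n
--     return 1 << (n - 1)
-- ===== Notes on version B (the rewrite author's own statement) =====
-- stated objective: faster
-- what changed: Replaced the quadratic loop that keeps appending the running stack sum plus one by the equivalent closed-form power of two, computed as a single bit shift.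
import Mathlib
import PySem

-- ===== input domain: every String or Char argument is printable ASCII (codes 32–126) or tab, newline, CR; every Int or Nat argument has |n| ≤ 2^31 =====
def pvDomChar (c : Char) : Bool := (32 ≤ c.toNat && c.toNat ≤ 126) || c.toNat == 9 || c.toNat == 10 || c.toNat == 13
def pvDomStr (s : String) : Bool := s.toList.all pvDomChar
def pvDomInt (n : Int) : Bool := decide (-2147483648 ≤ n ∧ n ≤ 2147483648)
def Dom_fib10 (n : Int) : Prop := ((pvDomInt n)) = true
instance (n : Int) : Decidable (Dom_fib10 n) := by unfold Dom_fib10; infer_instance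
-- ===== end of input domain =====

-- B replaces A's loop (append sum(stack)+1, n-2 times) by the closed form 2^(n-1): faster (asymptotic).

-- ===== PORT A =====
-- the while loop: temp counts down to 0, each step appends sum(stack)+1
def fib10Loop : Nat → List Int → List Int
  | 0, s => s
  | k+1, s => fib10Loop k (s ++ [s.sum + 1])

def fib10 (n : Int) : Int :=
  let stack : List Int := [1, 2]
  if n ≤ 2 then n
  else
    let temp := n - 2
    -- temp ≥ 1 here, so temp.toNat iterations = the while loop; stack[-1] never raises (stack nonempty)
    (PySem.List.pyGet? (fib10Loop temp.toNat stack) (-1)).getD 0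

-- ===== PORT B =====
-- Source B's '1 << (n - 1)' ported as 2 ^ (n-1).toNat (n ≥ 3 here, so n-1 ≥ 0)
def fib10_alt (n : Int) : Int :=
  if n ≤ 2 then n
  else 2 ^ (n - 1).toNat

-- ===== PRECONDITION & SPEC =====
def Spec_fib10 (n : Int) (out : Int) : Prop := out = fib10_alt n
instance (n : Int) (out : Int) : Decidable (Spec_fib10 n out) := by unfold Spec_fib10; infer_instance

-- ===== CLAIM (what is proved, stated in full; the proofs are below) =====
def Claim_equal_fib10 : Prop := ∀ (n : Int), Dom_fib10 n → Spec_fib10 n (fib10 n)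

-- ===== LEMMAS AND PROOFS =====

-- after k+1 iterations the last element is 2^k * (sum s + 1)
theorem fib10Loop_last (k : Nat) : ∀ (s : List Int),
    ∃ t, fib10Loop (k+1) s = t ++ [2 ^ k * (s.sum + 1)] := by
  induction k with
  | zero => intro s; exact ⟨s, by simp [fib10Loop]⟩
  | succ k ih =>
    intro s
    obtain ⟨t, ht⟩ := ih (s ++ [s.sum + 1])
    refine ⟨t, ?_⟩
    show fib10Loop (k+1) (s ++ [s.sum + 1]) = _
    rw [ht]
    congr 1
    simp [List.sum_append]
    ring

-- ===== VERDICT (by name: the statement is the Claim_ definition above) =====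
theorem fib10_spec : Claim_equal_fib10 := by
  intro n _
  unfold Spec_fib10 fib10 fib10_alt
  by_cases h : n ≤ 2
  · simp [h]
  · simp only [h, if_false]
    have hk : (n - 2).toNat = (n - 3).toNat + 1 := by omega
    obtain ⟨t, ht⟩ := fib10Loop_last (n - 3).toNat [1, 2]
    rw [hk, ht, PySem.List.pyGet?_neg_one_append_singleton]
    have : (n - 1).toNat = (n - 3).toNat + 2 := by omega
    rw [this]
    simp [List.sum_cons]
    ring
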